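-- pv_equiv track=rewrite | github.com/jethridge13/AdventOfCode2017 | Day21.py | arrayify
-- ===== SOURCE A (Python) =====
-- def arrayify(line):
-- 	s = []
-- 	l = []
-- 	for i in line:
-- 		if i == '/':
-- 			s.append(l)
-- 			l = []
-- 		else:
-- 			l.append(i)
-- 	s.append(l)
-- 	return s
-- ===== SOURCE B (Python) =====
-- def arrayify(line):
-- 	return [list(part) for part in line.split('/')]
-- ===== Notes on version B (the rewrite author's own statement) =====
-- stated objective: idiomatic
-- what changed: Replaces the character-by-character accumulator scan with a two-phase split('/') followed by a comprehension mapping each segment to its character list.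
import Mathlib
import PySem

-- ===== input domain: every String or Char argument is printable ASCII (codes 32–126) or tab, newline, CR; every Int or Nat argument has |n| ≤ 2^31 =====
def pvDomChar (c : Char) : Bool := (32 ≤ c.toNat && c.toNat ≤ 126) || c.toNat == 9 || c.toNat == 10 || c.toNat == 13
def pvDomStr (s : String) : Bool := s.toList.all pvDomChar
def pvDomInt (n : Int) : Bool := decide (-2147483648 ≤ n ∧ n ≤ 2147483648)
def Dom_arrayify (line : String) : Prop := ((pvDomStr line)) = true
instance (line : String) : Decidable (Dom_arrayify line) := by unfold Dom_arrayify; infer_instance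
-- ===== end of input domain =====

-- B splits the whole string on '/' first, then maps each segment to its character list (idiomatic two-phase rewrite of A's single accumulator scan).

-- ===== PORT A =====
def arrayify (line : String) : List (List String) :=
  let r := line.toList.foldl
    (fun (acc : List (List String) × List String) i =>
      if i == '/' then (acc.1 ++ [acc.2], [])
      else (acc.1, acc.2 ++ [String.ofList [i]]))
    ([], [])
  r.1 ++ [r.2]

-- ===== PORT B =====
def arrayify_alt (line : String) : List (List String) :=
  (PySem.Chars.splitOn line.toList ['/']).map (fun p => p.map (fun c => String.ofList [c]))

-- ===== PRECONDITION & SPEC =====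
def Spec_arrayify (line : String) (out : List (List String)) : Prop := out = arrayify_alt line
instance (line : String) (out : List (List String)) : Decidable (Spec_arrayify line out) := by unfold Spec_arrayify; infer_instance

-- ===== CLAIM (what is proved, stated in full; the proofs are below) =====
def Claim_equal_arrayify : Prop := ∀ (line : String), Dom_arrayify line → Spec_arrayify line (arrayify line)

-- ===== LEMMAS AND PROOFS =====

-- prepend p onto the first group (first group exists in all our uses)
def consFirst {α : Type} (p : List α) : List (List α) → List (List α)
  | [] => [p]
  | g :: gs => (p ++ g) :: gs

-- the common characterisation: the '/'-delimited groups of a char list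
def groupsC : List Char → List (List Char)
  | [] => [[]]
  | c :: cs => if c = '/' then [] :: groupsC cs else consFirst [c] (groupsC cs)

theorem groupsC_ne_nil (cs : List Char) : groupsC cs ≠ [] := by
  induction cs with
  | nil => simp [groupsC]
  | cons c cs ih =>
    simp only [groupsC]
    split
    · simp
    · cases h : groupsC cs with
      | nil => exact absurd h ih
      | cons g gs => simp [consFirst]

theorem consFirst_nil_groups {α : Type} (gs : List (List α)) (h : gs ≠ []) :
    consFirst [] gs = gs := by
  cases gs with
  | nil => exact absurd rfl h
  | cons g gs => simp [consFirst]

theorem consFirst_append {α : Type} (p q : List α) (gs : List (List α)) :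
    consFirst (p ++ q) gs = consFirst p (consFirst q gs) := by
  cases gs <;> simp [consFirst]

-- A-side: the foldl accumulates exactly the groups
theorem foldA_eq (cs : List Char) (s : List (List String)) (l : List String) :
    (let r := cs.foldl
      (fun (acc : List (List String) × List String) i =>
        if i == '/' then (acc.1 ++ [acc.2], [])
        else (acc.1, acc.2 ++ [String.ofList [i]]))
      (s, l)
     r.1 ++ [r.2])
    = s ++ consFirst l ((groupsC cs).map (fun p => p.map (fun c => String.ofList [c]))) := by
  induction cs generalizing s l with
  | nil => simp [groupsC, consFirst]
  | cons c cs ih =>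
    simp only [List.foldl_cons]
    by_cases hc : c = '/'
    · subst hc
      simp only [beq_self_eq_true, if_true]
      rw [ih]
      have hne : (groupsC cs).map (fun p => p.map (fun c => String.ofList [c])) ≠ [] := by
        simp [groupsC_ne_nil]
      rw [consFirst_nil_groups _ hne]
      cases hg : (groupsC cs).map (fun p => p.map (fun c => String.ofList [c])) with
      | nil => exact absurd hg hne
      | cons g gs => simp [groupsC, consFirst, hg]
    · rw [if_neg (show ¬((c == '/') = true) by simp [hc])]
      rw [ih]
      simp only [groupsC, if_neg hc]
      cases hg : groupsC cs with
      | nil => exact absurd hg (groupsC_ne_nil cs)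
      | cons g gs => simp [consFirst]
  
-- B-side: splitOn with the single-char separator '/' computes the same groups
theorem splitOn_go_eq (l : List Char) (fuel : Nat) (cur : List Char)
    (acc : List (List Char)) (hf : l.length < fuel) :
    PySem.Chars.splitOn.go ['/'] fuel l cur acc
      = acc.reverse ++ consFirst cur.reverse (groupsC l) := by
  induction l generalizing fuel cur acc with
  | nil =>
    cases fuel with
    | zero => omega
    | succ f => simp [PySem.Chars.splitOn.go, groupsC, consFirst]
  | cons c cs ih =>
    cases fuel with
    | zero => omega
    | succ f =>
      rw [PySem.Chars.splitOn.go]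
      by_cases hc : c = '/'
      · subst hc
        have hpre : List.isPrefixOf ['/'] ('/' :: cs) = true := by
          simp [List.isPrefixOf]
        simp only [hpre, if_pos, List.length_cons, List.length_nil, List.drop_succ_cons,
          List.drop_zero]
        rw [ih f [] (cur.reverse :: acc) (by simpa using Nat.lt_of_succ_lt_succ hf)]
        have hne := groupsC_ne_nil cs
        simp only [List.reverse_nil]
        rw [consFirst_nil_groups _ hne]
        simp [groupsC, consFirst]
      · have hpre : List.isPrefixOf ['/'] (c :: cs) = false := by
          simp [List.isPrefixOf, Ne.symm hc]
        simp only [hpre, Bool.false_eq_true, if_false]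
        rw [ih f (c :: cur) acc (by simpa using Nat.lt_of_succ_lt_succ hf)]
        simp only [groupsC, if_neg hc, List.reverse_cons]
        rw [consFirst_append]

theorem splitOn_slash (cs : List Char) :
    PySem.Chars.splitOn cs ['/'] = groupsC cs := by
  unfold PySem.Chars.splitOn
  rw [splitOn_go_eq cs (cs.length + 1) [] [] (by omega)]
  simp [consFirst_nil_groups _ (groupsC_ne_nil cs)]

-- ===== VERDICT (by name: the statement is the Claim_ definition above) =====
theorem arrayify_spec : Claim_equal_arrayify := by
  intro line _
  unfold Spec_arrayify arrayify arrayify_alt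
  rw [splitOn_slash]
  have h := foldA_eq line.toList [] []
  simpa [consFirst_nil_groups _ (by simp [groupsC_ne_nil] :
    (groupsC line.toList).map (fun p => p.map (fun c => String.ofList [c])) ≠ [])] using h
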